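-- pv_equiv track=rewrite | github.com/DataDog/system-tests | utils/scripts/activate_easy_wins/core.py | tup_to_rule
-- ===== SOURCE A (Python) =====
-- def tup_to_rule(tup: tuple[str]) -> str:
--     rule = tup[0]
--     sep = "/"
--     for element in tup[1:]:
--         rule += f"{sep}{element}"
--         if element.endswith(".py"):
--             sep = "::"
--     return rule
-- ===== SOURCE B (Python) =====
-- def tup_to_rule(tup: tuple[str]) -> str:
--     head = tup[0]
--     rest = tup[1:]
--     for j, e in enumerate(rest):
--         if e.endswith(".py"):
--             prefix = "/".join((head,) + rest[:j + 1])
--             tail = rest[j + 1:]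
--             return prefix + "::" + "::".join(tail) if tail else prefix
--     return "/".join((head,) + rest)
-- ===== Notes on version B (the rewrite author's own statement) =====
-- stated objective: simpler
-- what changed: Replaces the stateful separator-flipping accumulation loop by a find-split decomposition: locate the first '.py' element after the head, then build the result with two bulk str.join calls.
import Mathlib
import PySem

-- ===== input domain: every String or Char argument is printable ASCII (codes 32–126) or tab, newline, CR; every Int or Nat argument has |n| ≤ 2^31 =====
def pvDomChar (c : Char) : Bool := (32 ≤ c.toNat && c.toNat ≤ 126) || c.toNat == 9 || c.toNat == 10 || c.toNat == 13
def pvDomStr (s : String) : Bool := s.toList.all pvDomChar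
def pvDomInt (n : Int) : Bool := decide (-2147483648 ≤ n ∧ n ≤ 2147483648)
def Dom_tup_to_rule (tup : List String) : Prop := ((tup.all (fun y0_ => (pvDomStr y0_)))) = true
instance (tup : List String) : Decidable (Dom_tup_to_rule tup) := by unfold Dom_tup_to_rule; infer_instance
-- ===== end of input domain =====

-- B replaces A's stateful separator-flipping loop by a find-split decomposition
-- (locate the first '.py' element after the head, then two bulk joins); objective: simpler.

-- ===== PORT A =====
-- one loop step of A: rule += sep + element; sep flips to "::" after a ".py" element
def stepA (st : String × String) (e : String) : String × String :=
  (st.1 ++ st.2 ++ e, if PySem.Str.endswith e ".py" then "::" else st.2)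

def tup_to_rule (tup : List String) : String :=
  match tup with
  | [] => ""   -- unreachable: Python A raises IndexError on an empty tuple (excluded by Pre_)
  | h :: t => (t.foldl stepA (h, "/")).1

-- ===== PORT B =====
-- index of the first element ending in ".py" (Source B's enumerate scan)
def pyFind : List String → Option Nat
  | [] => none
  | e :: r => if PySem.Str.endswith e ".py" then some 0 else (pyFind r).map (· + 1)

def tup_to_rule_alt (tup : List String) : String :=
  match tup with
  | [] => ""   -- unreachable: Source B's tup[0] raises IndexError (excluded by Pre_)
  | head :: rest =>
    match pyFind rest with
    | some j =>
      let pre := PySem.Str.join "/" (head :: rest.take (j + 1))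
      let tail := rest.drop (j + 1)
      if tail.isEmpty then pre else pre ++ "::" ++ PySem.Str.join "::" tail
    | none => PySem.Str.join "/" (head :: rest)

-- ===== PRECONDITION & SPEC =====
-- Pre_ excludes only the empty tuple, on which both A and B raise IndexError.
def Pre_tup_to_rule (tup : List String) : Prop := tup ≠ []
instance (tup : List String) : Decidable (Pre_tup_to_rule tup) := by unfold Pre_tup_to_rule; infer_instance
def pvWitness_tup_to_rule : List String := ["tests", "mod.py", "Test_cls"]

def Spec_tup_to_rule (tup : List String) (out : String) : Prop := out = tup_to_rule_alt tup
instance (tup : List String) (out : String) : Decidable (Spec_tup_to_rule tup out) := by unfold Spec_tup_to_rule; infer_instance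

-- ===== CLAIM (what is proved, stated in full; the proofs are below) =====
def Claim_equal_tup_to_rule : Prop := ∀ (tup : List String), Dom_tup_to_rule tup → Pre_tup_to_rule tup → Spec_tup_to_rule tup (tup_to_rule tup)

-- ===== LEMMAS AND PROOFS =====
-- sep-prefixed concatenation: catS sep [a, b] = sep ++ a ++ sep ++ b
def catS (sep : String) : List String → String
  | [] => ""
  | e :: r => sep ++ e ++ catS sep r

theorem join_eq_catS (sep h : String) (t : List String) :
    PySem.Str.join sep (h :: t) = h ++ catS sep t := by
  induction t generalizing h with
  | nil => simp [catS, PySem.Str.join]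
  | cons e r ih =>
    rw [show PySem.Str.join sep (h :: e :: r) = h ++ sep ++ PySem.Str.join sep (e :: r) from by
      simp [PySem.Str.join, PySem.Chars.join_cons_cons, String.append_assoc], ih]
    simp [catS, String.append_assoc]

theorem foldA_sep2 (rest : List String) (rule : String) :
    rest.foldl stepA (rule, "::") = (rule ++ catS "::" rest, "::") := by
  induction rest generalizing rule with
  | nil => simp [catS]
  | cons e r ih => simp [stepA, catS, ih, String.append_assoc]

theorem foldA_sep1 (rest : List String) (rule : String) :
    (rest.foldl stepA (rule, "/")).1 =
      match pyFind rest with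
      | some j => rule ++ catS "/" (rest.take (j + 1)) ++ catS "::" (rest.drop (j + 1))
      | none => rule ++ catS "/" rest := by
  induction rest generalizing rule with
  | nil => simp [catS, pyFind]
  | cons e r ih =>
    by_cases h : PySem.Str.endswith e ".py" = true
    · rw [List.foldl_cons, show stepA (rule, "/") e = (rule ++ "/" ++ e, "::") from by
        simp only [stepA, if_pos h], foldA_sep2]
      simp only [pyFind, if_pos h]
      simp [catS, String.append_assoc]
    · rw [List.foldl_cons, show stepA (rule, "/") e = (rule ++ "/" ++ e, "/") from by
        simp only [stepA, if_neg h], ih]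
      simp only [pyFind, if_neg h]
      cases hf : pyFind r with
      | none => simp [catS, String.append_assoc]
      | some j => simp [catS, String.append_assoc]

-- ===== VERDICT (by name: the statement is the Claim_ definition above) =====
theorem tup_to_rule_spec : Claim_equal_tup_to_rule := by
  intro tup _ hpre
  unfold Spec_tup_to_rule tup_to_rule tup_to_rule_alt
  match tup with
  | [] => exact absurd rfl hpre
  | h :: t =>
    simp only [foldA_sep1]
    cases hf : pyFind t with
    | none => simp [join_eq_catS]
    | some j =>
      cases hd : t.drop (j + 1) with
      | nil => simp [join_eq_catS, hd, catS]
      | cons x xs => simp [join_eq_catS, hd, catS, String.append_assoc]
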